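-- pv_equiv track=rewrite | github.com/daily-boj/greenstar1151 | P2718.py | fourNtiles
-- ===== SOURCE A (Python) =====
-- def fourNtiles(n):
--     if n == 0:
--         return 1
--     elif n == 1:
--         return 1
--     elif n == 2:
--         return 5
--     k = 4 * fourNtiles(n-2) + fourNtiles(n-1)
--     for i in range(3, n+1):
--         if i % 2 == 1:
--             k += 2 * fourNtiles(n - i)
--         else:
--             k += 3 * fourNtiles(n - i)
--     return k
-- ===== SOURCE B (Python) =====
-- def fourNtiles(n):
--     if n < 4:
--         return [1, 1, 5, 11][n]
--     a, b, c, d = 1, 1, 5, 11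
--     for _ in range(4, n + 1):
--         a, b, c, d = b, c, d, d + 5 * c + b - a
--     return d
-- ===== Notes on version B (the rewrite author's own statement) =====
-- stated objective: faster
-- what changed: Replaced the exponentially branching recursion with weighted sum over all smaller values by a bottom-up loop rolling four variables of the equivalent linear recurrence f(n)=f(n-1)+5f(n-2)+f(n-3)-f(n-4).
import Mathlib
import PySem

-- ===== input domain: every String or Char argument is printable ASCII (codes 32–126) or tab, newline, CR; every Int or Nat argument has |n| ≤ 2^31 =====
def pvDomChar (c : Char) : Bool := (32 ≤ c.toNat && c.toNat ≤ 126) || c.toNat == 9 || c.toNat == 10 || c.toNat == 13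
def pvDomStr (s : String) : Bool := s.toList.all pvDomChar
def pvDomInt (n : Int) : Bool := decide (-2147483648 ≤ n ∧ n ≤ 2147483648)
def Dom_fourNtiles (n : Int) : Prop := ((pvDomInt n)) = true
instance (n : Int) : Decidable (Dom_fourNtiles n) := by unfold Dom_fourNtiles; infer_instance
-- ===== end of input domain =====

-- B replaces A's exponentially branching recursion by a bottom-up 4-variable linear recurrence (faster).

-- ===== PORT A =====
-- A recurses on n-1, n-2 and n-i; the Nat fuel (depth bound n+1) only makes the
-- recursion total in Lean — inside Pre_ (0 ≤ n) it is never exhausted.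
def fourA : Nat → Int → Int
  | 0, _ => 0
  | fuel+1, n =>
    if n = 0 then 1
    else if n = 1 then 1
    else if n = 2 then 5
    else
      let k := 4 * fourA fuel (n-2) + fourA fuel (n-1)
      (PySem.List.pyRange 3 (n+1) 1).foldl
        (fun k i =>
          if PySem.Int.mod i 2 = 1 then k + 2 * fourA fuel (n - i)
          else k + 3 * fourA fuel (n - i)) k

def fourNtiles (n : Int) : Int := fourA (n.toNat + 1) n

-- ===== PORT B =====
def fourNtiles_alt (n : Int) : Int :=
  let vals : List Int := [1, 1, 5, 11]
  if n < 4 then (PySem.List.pyGet? vals n).getD 0  -- none = IndexError (only for n < -4, outside Pre_)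
  else
    let s := (PySem.List.pyRange 4 (n+1) 1).foldl
      (fun (s : Int × Int × Int × Int) _ =>
        (s.2.1, s.2.2.1, s.2.2.2, s.2.2.2 + 5 * s.2.2.1 + s.2.1 - s.1))
      (1, 1, 5, 11)
    s.2.2.2

-- ===== PRECONDITION & SPEC =====
-- Pre_: A recurses forever (Python: RecursionError) on negative n, so those inputs are excluded.
def Pre_fourNtiles (n : Int) : Prop := 0 ≤ n
instance (n : Int) : Decidable (Pre_fourNtiles n) := by unfold Pre_fourNtiles; infer_instance
def pvWitness_fourNtiles : Int := 6

def Spec_fourNtiles (n : Int) (out : Int) : Prop := out = fourNtiles_alt n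
instance (n : Int) (out : Int) : Decidable (Spec_fourNtiles n out) := by unfold Spec_fourNtiles; infer_instance

-- ===== CLAIM (what is proved, stated in full; the proofs are below) =====
def Claim_equal_fourNtiles : Prop := ∀ (n : Int), Dom_fourNtiles n → Pre_fourNtiles n → Spec_fourNtiles n (fourNtiles n)

-- ===== LEMMAS AND PROOFS =====

-- the common mathematical value: the 4-term linear recurrence
def G : Nat → Int
  | 0 => 1
  | 1 => 1
  | 2 => 5
  | 3 => 11
  | (m+4) => G (m+3) + 5 * G (m+2) + G (m+1) - G m

-- the weighted sum A's loop accumulates, reindexed by j = i - 3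
def S (m : Nat) : Int :=
  ((List.range (m+1)).map (fun j => if j % 2 = 0 then 2 * G (m - j) else 3 * G (m - j))).sum

lemma foldl_ite_add {α : Type} (p : α → Prop) [DecidablePred p] (g h : α → Int) :
    ∀ (l : List α) (k : Int),
      l.foldl (fun k i => if p i then k + g i else k + h i) k
        = k + (l.map (fun i => if p i then g i else h i)).sum := by
  intro l
  induction l with
  | nil => simp
  | cons x t ih =>
    intro k
    by_cases hx : p x <;> simp [hx, ih] <;> ring

lemma S_step (m : Nat) : S (m+2) = 2 * G (m+2) + 3 * G (m+1) + S m := by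
  unfold S
  rw [show m+2+1 = (m+1)+1+1 from rfl, List.range_succ_eq_map, List.range_succ_eq_map]
  simp only [List.map_cons, List.map_map, List.sum_cons]
  have hmap : (List.range (m+1)).map
      ((fun j => if j % 2 = 0 then 2 * G (m+2 - j) else 3 * G (m+2 - j)) ∘ (Nat.succ ∘ Nat.succ))
      = (List.range (m+1)).map (fun j => if j % 2 = 0 then 2 * G (m - j) else 3 * G (m - j)) := by
    apply List.map_congr_left
    intro j hj
    simp only [Function.comp_apply]
    have h1 : j.succ.succ % 2 = j % 2 := by omega
    have h2 : m + 2 - j.succ.succ = m - j := by omega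
    rw [h1, h2]
  rw [hmap]
  norm_num
  ring

lemma G_sum : ∀ m : Nat, G (m+3) = 4 * G (m+1) + G (m+2) + S m := by
  intro m
  induction m using Nat.strong_induction_on with
  | _ m IH =>
    match m with
    | 0 => decide
    | 1 => decide
    | (m+2) =>
      have ih := IH m (by omega)
      rw [S_step]
      have hG : G (m+2+3) = G (m+4) + 5 * G (m+3) + G (m+2) - G (m+1) := rfl
      rw [hG]
      linarith

lemma fourA_eq_G (k : Nat) : ∀ f : Nat, k < f → fourA f (↑k) = G k := by
  induction k using Nat.strong_induction_on with
  | _ k IH =>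
    intro f hf
    match f with
    | 0 => omega
    | (f'+1) =>
      match k with
      | 0 => simp [fourA, G]
      | 1 => norm_num [fourA, G]
      | 2 => norm_num [fourA, G]
      | (m+3) =>
        have hm1 : fourA f' (↑(m+3) - 2) = G (m+1) := by
          rw [show ((m+3 : Nat) : Int) - 2 = ((m+1 : Nat) : Int) by push_cast; ring]
          exact IH (m+1) (by omega) f' (by omega)
        have hm2 : fourA f' (↑(m+3) - 1) = G (m+2) := by
          rw [show ((m+3 : Nat) : Int) - 1 = ((m+2 : Nat) : Int) by push_cast; ring]
          exact IH (m+2) (by omega) f' (by omega)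
        have h0 : ¬ ((m+3 : Nat) : Int) = 0 := by omega
        have h1 : ¬ ((m+3 : Nat) : Int) = 1 := by omega
        have h2 : ¬ ((m+3 : Nat) : Int) = 2 := by omega
        rw [show fourA (f'+1) ((m+3 : Nat) : Int)
            = (PySem.List.pyRange 3 (((m+3 : Nat) : Int)+1) 1).foldl
                (fun k i =>
                  if PySem.Int.mod i 2 = 1 then k + 2 * fourA f' (((m+3 : Nat) : Int) - i)
                  else k + 3 * fourA f' (((m+3 : Nat) : Int) - i))
                (4 * fourA f' (((m+3 : Nat) : Int)-2) + fourA f' (((m+3 : Nat) : Int)-1))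
          from by simp only [fourA, h0, h1, h2, if_false]]
        rw [foldl_ite_add, hm1, hm2, PySem.List.pyRange_one]
        rw [show (((m+3 : Nat) : Int) + 1 - 3).toNat = m+1 by omega]
        rw [List.map_map]
        have hmap : (List.range (m+1)).map
            ((fun i => if PySem.Int.mod i 2 = 1 then 2 * fourA f' (((m+3 : Nat) : Int) - i)
                       else 3 * fourA f' (((m+3 : Nat) : Int) - i)) ∘ (fun k : Nat => (3 : Int) + ↑k))
            = (List.range (m+1)).map (fun j => if j % 2 = 0 then 2 * G (m - j) else 3 * G (m - j)) := by
          apply List.map_congr_left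
          intro j hj
          have hj' : j < m+1 := List.mem_range.mp hj
          simp only [Function.comp_apply]
          have hmod : PySem.Int.mod ((3 : Int) + ↑j) 2 = ((3 : Int) + (j:Int)) % 2 :=
            PySem.Int.mod_eq_emod_of_pos (by norm_num)
          have harg : ((m+3 : Nat) : Int) - ((3 : Int) + (j:Int)) = ((m - j : Nat) : Int) := by omega
          have hrec : fourA f' (((m - j : Nat) : Int)) = G (m - j) :=
            IH (m - j) (by omega) f' (by omega)
          rw [hmod, harg, hrec]
          by_cases hp : j % 2 = 0
          · rw [if_pos (by omega : ((3 : Int) + (j:Int)) % 2 = 1), if_pos hp]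
          · rw [if_neg (by omega : ¬ ((3 : Int) + (j:Int)) % 2 = 1), if_neg hp]
        rw [hmap]
        have := G_sum m
        unfold S at this
        linarith

-- B's loop invariant: after processing range(4, m+3+1) the state holds G(m), …, G(m+3)
lemma alt_loop_inv : ∀ m : Nat,
    (PySem.List.pyRange 4 (((m+3 : Nat) : Int) + 1) 1).foldl
      (fun (s : Int × Int × Int × Int) _ =>
        (s.2.1, s.2.2.1, s.2.2.2, s.2.2.2 + 5 * s.2.2.1 + s.2.1 - s.1))
      (1, 1, 5, 11)
      = (G m, G (m+1), G (m+2), G (m+3)) := by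
  intro m
  induction m with
  | zero =>
    rw [PySem.List.pyRange_one_eq_nil (by norm_num)]
    decide
  | succ m ih =>
    rw [show ((m+1+3 : Nat) : Int) + 1 = (((m+3 : Nat) : Int) + 1) + 1 by push_cast; ring]
    rw [PySem.List.pyRange_one_succ_right (by omega)]
    rw [List.foldl_append, ih]
    have hG : G (m+4) = G (m+3) + 5 * G (m+2) + G (m+1) - G m := rfl
    simp only [List.foldl_cons, List.foldl_nil]
    rw [show m+1+1 = m+2 from rfl, show m+1+2 = m+3 from rfl, show m+1+3 = m+4 from rfl, hG]

lemma alt_eq_G (k : Nat) : fourNtiles_alt (↑k) = G k := by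
  by_cases hk : k < 4
  · interval_cases k <;> decide
  · unfold fourNtiles_alt
    rw [if_neg (by omega)]
    obtain ⟨m, rfl⟩ : ∃ m, k = m + 3 := ⟨k - 3, by omega⟩
    simp only [alt_loop_inv m]

-- ===== VERDICT (by name: the statement is the Claim_ definition above) =====
theorem fourNtiles_spec : Claim_equal_fourNtiles := by
  intro n _ hn
  have hn0 : 0 ≤ n := hn
  unfold Spec_fourNtiles
  have hn' : n = ((n.toNat : Nat) : Int) := by omega
  rw [hn']
  unfold fourNtiles
  rw [Int.toNat_natCast]
  rw [fourA_eq_G n.toNat (n.toNat + 1) (by omega), alt_eq_G]
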